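-- pv_equiv track=rewrite | github.com/cayenwang/random-walks | Wills_Gems/RandomWalksTester.py | int2Dir
-- ===== SOURCE A (Python) =====
-- def int2Dir(v):
--     numList = list(map(lambda x: int(x), str(v)))
--     runLocation = [0,0]
--     runDir = [[0,0]]
--     for i in numList:
--         lookup = {0: [1,0], 1: [-1,0], 2: [0,1], 3: [0,-1]}
--         runLocation = [runLocation[0]+lookup[i][0], runLocation[1] + lookup[i][1]]
--         runDir.append(runLocation)
--     return runDir        #this doesnt work for a leading 0 but it seems to work fine otherwise
-- ===== SOURCE B (Python) =====
-- def _scan(vals):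
--     out = [0]
--     for t in vals:
--         out.append(out[-1] + t)
--     return out
--
-- def int2Dir(v):
--     lookup = {0: [1, 0], 1: [-1, 0], 2: [0, 1], 3: [0, -1]}
--     deltas = [lookup[int(c)] for c in str(v)]
--     xs = _scan(d[0] for d in deltas)
--     ys = _scan(d[1] for d in deltas)
--     return [[x, y] for x, y in zip(xs, ys)]
-- ===== Notes on version B (the rewrite author's own statement) =====
-- stated objective: alternative
-- what changed: replaced the single paired-accumulation loop over a [x,y] state with a map-to-deltas step followed by two independent per-axis prefix-sum scans that are zipped back into pairs
import Mathlib
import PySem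

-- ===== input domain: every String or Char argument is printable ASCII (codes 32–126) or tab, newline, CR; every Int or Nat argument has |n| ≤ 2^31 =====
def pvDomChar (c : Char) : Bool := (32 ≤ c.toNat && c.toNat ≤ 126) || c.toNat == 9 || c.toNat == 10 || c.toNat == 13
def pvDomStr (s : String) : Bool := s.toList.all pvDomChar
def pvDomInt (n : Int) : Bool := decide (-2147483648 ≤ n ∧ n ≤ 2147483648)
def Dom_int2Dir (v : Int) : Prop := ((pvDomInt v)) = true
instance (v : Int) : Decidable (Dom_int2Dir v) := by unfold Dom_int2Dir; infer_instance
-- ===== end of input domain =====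

-- B keeps the same digit→delta lookup but replaces A's single paired-accumulation loop with
-- two independent per-axis prefix-sum scans, zipped back into pairs.

-- ===== PORT A =====
-- the dict literal {0:[1,0],1:[-1,0],2:[0,1],3:[0,-1]}
def pvLookup : PySem.Dict Int (List Int) :=
  PySem.Dict.ofList [(0, [1, 0]), (1, [-1, 0]), (2, [0, 1]), (3, [0, -1])]

-- numList = list(map(lambda x: int(x), str(v)))  — int of each single-character string
def pvNumList (v : Int) : List Int :=
  (PySem.Int.toStr v).toList.map (fun c => (PySem.Int.ofStr? (String.ofList [c])).getD 0)

-- the for-loop over numList, state = (runLocation, runDir); list indexing is in range (getD exact)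
def int2DirLoop : List Int → List Int → List (List Int) → List (List Int)
  | [], _, runDir => runDir
  | i :: rest, runLocation, runDir =>
    let d := (PySem.Dict.get? pvLookup i).getD [0, 0]
    let runLocation' := [PySem.List.pyGetD runLocation 0 0 + PySem.List.pyGetD d 0 0,
                         PySem.List.pyGetD runLocation 1 0 + PySem.List.pyGetD d 1 0]
    int2DirLoop rest runLocation' (runDir ++ [runLocation'])

def int2Dir (v : Int) : List (List Int) :=
  int2DirLoop (pvNumList v) [0, 0] [[0, 0]]

-- ===== PORT B =====
-- _scan: out = [0]; for t in vals: out.append(out[-1] + t)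
def pvScan (vals : List Int) : List Int :=
  vals.foldl (fun out t => out ++ [PySem.List.pyGetD out (-1) 0 + t]) [0]

-- deltas = [lookup[int(c)] for c in str(v)]
def pvDeltas (v : Int) : List (List Int) :=
  (PySem.Int.toStr v).toList.map
    (fun c => (PySem.Dict.get? pvLookup ((PySem.Int.ofStr? (String.ofList [c])).getD 0)).getD [0, 0])

def int2Dir_alt (v : Int) : List (List Int) :=
  ((pvScan ((pvDeltas v).map (fun d => PySem.List.pyGetD d 0 0))).zip
    (pvScan ((pvDeltas v).map (fun d => PySem.List.pyGetD d 1 0)))).map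
    (fun p => [p.1, p.2])

-- ===== PRECONDITION & SPEC =====
-- Pre_ excludes exactly the inputs where Python A raises: negative v (int('-') → ValueError)
-- and any digit outside the lookup dict (KeyError); both A and B raise on all of these.
def Pre_int2Dir (v : Int) : Prop :=
  0 ≤ v ∧ (PySem.Int.toChars v).all (fun c => c == '0' || c == '1' || c == '2' || c == '3') = true
instance (v : Int) : Decidable (Pre_int2Dir v) := by unfold Pre_int2Dir; infer_instance
def pvWitness_int2Dir : Int := 123

def Spec_int2Dir (v : Int) (out : List (List Int)) : Prop := out = int2Dir_alt v
instance (v : Int) (out : List (List Int)) : Decidable (Spec_int2Dir v out) := by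
  unfold Spec_int2Dir; infer_instance

-- ===== CLAIM (what is proved, stated in full; the proofs are below) =====
def Claim_equal_int2Dir : Prop :=
  ∀ (v : Int), Dom_int2Dir v → Pre_int2Dir v → Spec_int2Dir v (int2Dir v)

-- ===== LEMMAS AND PROOFS =====

-- proof-side spine: the tail of a prefix scan starting at s
def pvTail (s : Int) : List Int → List Int
  | [] => []
  | t :: r => (s + t) :: pvTail (s + t) r

lemma pvGet0 (x y : Int) : PySem.List.pyGetD [x, y] 0 0 = x := rfl
lemma pvGet1 (x y : Int) : PySem.List.pyGetD [x, y] 1 0 = y := rfl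

def pvDx (i : Int) : Int := PySem.List.pyGetD ((PySem.Dict.get? pvLookup i).getD [0, 0]) 0 0
def pvDy (i : Int) : Int := PySem.List.pyGetD ((PySem.Dict.get? pvLookup i).getD [0, 0]) 1 0

lemma pvScan_loop (vals : List Int) (pre : List Int) (s : Int) :
    vals.foldl (fun out t => out ++ [PySem.List.pyGetD out (-1) 0 + t]) (pre ++ [s]) =
      pre ++ [s] ++ pvTail s vals := by
  induction vals generalizing pre s with
  | nil => simp [pvTail]
  | cons t r ih =>
    simp only [List.foldl_cons, PySem.List.pyGetD_neg_one_append_singleton, pvTail]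
    have h := ih (pre ++ [s]) (s + t)
    simp only [List.append_assoc] at h ⊢
    simpa using h

lemma pvScan_eq (vals : List Int) : pvScan vals = 0 :: pvTail 0 vals := by
  have h := pvScan_loop vals [] 0
  simpa [pvScan] using h

lemma int2DirLoop_eq (l : List Int) (x y : Int) (acc : List (List Int)) :
    int2DirLoop l [x, y] acc =
      acc ++ ((pvTail x (l.map pvDx)).zip (pvTail y (l.map pvDy))).map
        (fun p => [p.1, p.2]) := by
  induction l generalizing x y acc with
  | nil => simp [int2DirLoop, pvTail]
  | cons i r ih =>
    simp only [int2DirLoop, pvGet0, pvGet1, List.map_cons, pvTail, List.zip_cons_cons,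
      List.map_cons]
    rw [ih]
    simp [pvDx, pvDy]

theorem int2Dir_eq_alt (v : Int) : int2Dir v = int2Dir_alt v := by
  unfold int2Dir int2Dir_alt pvNumList pvDeltas
  rw [int2DirLoop_eq, pvScan_eq, pvScan_eq]
  simp [Function.comp_def, pvDx, pvDy]

-- ===== VERDICT (by name: the statement is the Claim_ definition above) =====
theorem int2Dir_spec : Claim_equal_int2Dir := by
  intro v _ _
  unfold Spec_int2Dir
  exact int2Dir_eq_alt v
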